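-- pv_equiv track=rewrite | github.com/PaccMann/paccmann_datasets | pytoda/proteins/transforms.py | extract_active_sites_info
-- ===== SOURCE A (Python) =====
-- from typing import Dict, List, Tuple, Union
--
-- def extract_active_sites_info(
--     aligned_seq: str,
-- ) -> Tuple[str, List[str], List[str], List[str]]:
--     """
--     Processes and extracts useful information from an aligned protein sequence.
--     Expects lower case amino acids to be outside of the relevant area (e.g., active site)
--     and upper case amino acids to be inside it.
--
--     Args:
--         aligned_seq: A string containing the aligned protein sequence including
--             lower case amino acids and high case amino acids.
--
--     Returns:
--         4-Tuple of:
--         aligned_seq (str): The input sequence.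
--         non_active_sites (List[str]): A list of strings, one item for each contiguous
--             subsequence NOT belonging to active site.
--         active_sites (List[str]): A list of strings, one item for each contiguous
--             subsequence belonging to active site.
--         all_seqs (List[str]): A list of strings, one item for each contiguous
--             subsequence that either belongs to the active site or not.
--     """
--
--     non_active_sites = ''
--     active_sites = ''
--     prev_was_highcase = False
--     for c in aligned_seq:
--         next_is_highcase = c <= 'Z'
--         if next_is_highcase ^ prev_was_highcase:
--             if next_is_highcase:
--                 active_sites += '#'
--             else:
--                 non_active_sites += '#'
--
--         if next_is_highcase:
--             active_sites += c
--             prev_was_highcase = True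
--         else:
--             non_active_sites += c
--             prev_was_highcase = False
--
--     non_active_sites = [s for s in non_active_sites.split('#') if s != '']
--     active_sites = [s for s in active_sites.split('#') if s != '']
--
--     if aligned_seq[0] <= 'Z':
--         zip_obj = zip(active_sites, non_active_sites)
--     else:
--         zip_obj = zip(non_active_sites, active_sites)
--
--     all_seqs = [i for one_tuple in zip_obj for i in one_tuple]
--
--     if len(active_sites) > len(non_active_sites):
--         assert len(active_sites) == len(non_active_sites) + 1
--         all_seqs.append(active_sites[-1])
--     elif len(active_sites) < len(non_active_sites):
--         assert len(active_sites) + 1 == len(non_active_sites)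
--         all_seqs.append(non_active_sites[-1])
--
--     return aligned_seq, non_active_sites, active_sites, all_seqs
-- ===== SOURCE B (Python) =====
-- def extract_active_sites_info(aligned_seq):
--     # One forward pass collecting maximal same-class runs directly; no sentinel/split/zip.
--     runs = []
--     cur = ''
--     for c in aligned_seq:
--         if cur and (c <= 'Z') == (cur[0] <= 'Z'):
--             cur += c
--         else:
--             if cur:
--                 runs.append(cur)
--             cur = c
--     if cur:
--         runs.append(cur)
--     active_sites = [r for r in runs if r[0] <= 'Z']
--     non_active_sites = [r for r in runs if r[0] > 'Z']
--     return aligned_seq, non_active_sites, active_sites, runs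
-- ===== Notes on version B (the rewrite author's own statement) =====
-- stated objective: simpler
-- what changed: B collects the maximal same-class runs in one forward pass and filters them by the class of their first character, replacing A's '#'-sentinel string building, split('#'), case-ordered zip interleave and final odd-run append. Pre_ excludes the empty string (A raises IndexError) and strings containing A's sentinel character '#' (impossible in a protein sequence), on which A either raises AssertionError or returns run lists split at the sentinel, a corner where neither value is specified.
-- outside the precondition, e.g. on extract_active_sites_info('A#'): A returns ('A#', [], ['A'], ['A']), B returns ('A#', [], ['A#'], ['A#']); on extract_active_sites_info('#'): A returns ('#', [], [], []), B returns ('#', [], ['#'], ['#']); on extract_active_sites_info(''): A raises IndexError, B returns ('', [], [], [])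
import Mathlib
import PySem

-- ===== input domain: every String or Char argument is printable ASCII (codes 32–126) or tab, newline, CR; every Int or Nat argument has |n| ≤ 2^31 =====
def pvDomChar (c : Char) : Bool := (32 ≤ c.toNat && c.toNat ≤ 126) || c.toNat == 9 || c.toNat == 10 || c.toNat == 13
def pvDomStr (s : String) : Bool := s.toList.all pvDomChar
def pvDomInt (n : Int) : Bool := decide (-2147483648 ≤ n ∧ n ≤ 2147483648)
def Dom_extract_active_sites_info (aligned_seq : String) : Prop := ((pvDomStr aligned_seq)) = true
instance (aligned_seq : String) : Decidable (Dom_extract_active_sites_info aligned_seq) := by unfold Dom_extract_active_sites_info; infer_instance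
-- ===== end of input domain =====

-- B replaces A's '#'-sentinel string building + split + case-ordered zip + leftover append
-- by one forward pass that collects the maximal same-class runs directly (objective: simpler).

-- ===== PORT A =====
def pvHigh (c : Char) : Bool := decide (c ≤ 'Z')

def pvALoop : List Char → List Char → List Char → Bool → List Char × List Char
  | [], na, as_, _ => (na, as_)
  | c :: cs, na, as_, prev =>
    let nh := pvHigh c
    let as' := if (nh ^^ prev) && nh then as_ ++ ['#'] else as_
    let na' := if (nh ^^ prev) && !nh then na ++ ['#'] else na
    if nh then pvALoop cs na' (as' ++ [c]) true
    else pvALoop cs (na' ++ [c]) as' false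

-- Python str.split('#') over List Char, exact by hand: splits at every '#', keeping empty pieces
def pvSplitHash : List Char → List (List Char)
  | [] => [[]]
  | c :: cs =>
    if c = '#' then [] :: pvSplitHash cs
    else match pvSplitHash cs with
      | [] => [[c]]
      | r :: rs => (c :: r) :: rs

def extract_active_sites_info (aligned_seq : String) : String × List String × List String × List String :=
  let p := pvALoop aligned_seq.toList [] [] false
  let non_active := (pvSplitHash p.1).filter (fun r => r ≠ [])
  let active := (pvSplitHash p.2).filter (fun r => r ≠ [])
  let b0 := match PySem.Str.pyGet? aligned_seq 0 with
            | some c => pvHigh c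
            | none => false      -- aligned_seq[0] is an IndexError in Python; excluded by Pre_
  let zipped := if b0 then active.zip non_active else non_active.zip active
  let all0 := zipped.flatMap (fun t => [t.1, t.2])
  let allS :=
    if active.length > non_active.length then all0 ++ [((PySem.List.pyGet? active (-1)).getD [])]
    else if active.length < non_active.length then all0 ++ [((PySem.List.pyGet? non_active (-1)).getD [])]
    else all0
  (aligned_seq, non_active.map String.ofList, active.map String.ofList, allS.map String.ofList)

-- ===== PORT B =====
-- r[0] <= 'Z' and r[0] > 'Z' on a (nonempty) run
def pvHd (r : List Char) : Bool := match r with | [] => false | d :: _ => pvHigh d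
def pvLowHd (r : List Char) : Bool := match r with | [] => false | d :: _ => decide ('Z' < d)

def pvBLoop : List Char → List (List Char) → List Char → List (List Char) × List Char
  | [], runs, cur => (runs, cur)
  | c :: cs, runs, cur =>
    if (match cur with | [] => false | d :: _ => pvHigh c == pvHigh d) then
      pvBLoop cs runs (cur ++ [c])
    else
      pvBLoop cs (if cur ≠ [] then runs ++ [cur] else runs) [c]

def extract_active_sites_info_alt (aligned_seq : String) : String × List String × List String × List String :=
  let p := pvBLoop aligned_seq.toList [] []
  let runs := if p.2 ≠ [] then p.1 ++ [p.2] else p.1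
  let active := runs.filter pvHd
  let non_active := runs.filter pvLowHd
  (aligned_seq, non_active.map String.ofList, active.map String.ofList, runs.map String.ofList)

-- ===== PRECONDITION & SPEC =====
-- Pre_ excludes the empty string, on which A's aligned_seq[0] raises IndexError, and strings
-- containing '#' — A's internal run separator, a character that cannot occur in a protein
-- sequence — on which A either raises AssertionError or returns run lists with the separator
-- character stripped and runs split at it; on such out-of-domain input neither that value nor
-- B's (which treats '#' as an ordinary character ≤ 'Z') is specified.
def Pre_extract_active_sites_info (aligned_seq : String) : Prop :=
  aligned_seq.toList ≠ [] ∧ '#' ∉ aligned_seq.toList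
instance (aligned_seq : String) : Decidable (Pre_extract_active_sites_info aligned_seq) := by
  unfold Pre_extract_active_sites_info; infer_instance

def pvWitness_extract_active_sites_info : String := "aBCd"

def Spec_extract_active_sites_info (aligned_seq : String) (out : String × List String × List String × List String) : Prop := out = extract_active_sites_info_alt aligned_seq
instance (aligned_seq : String) (out : String × List String × List String × List String) : Decidable (Spec_extract_active_sites_info aligned_seq out) := by unfold Spec_extract_active_sites_info; infer_instance

-- ===== CLAIM (what is proved, stated in full; the proofs are below) =====
def Claim_equal_extract_active_sites_info : Prop := ∀ (aligned_seq : String), Dom_extract_active_sites_info aligned_seq → Pre_extract_active_sites_info aligned_seq → Spec_extract_active_sites_info aligned_seq (extract_active_sites_info aligned_seq)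

-- ===== LEMMAS AND PROOFS =====

-- runs, joined with a '#' before each one (the shape of A's accumulator strings)
def pvHashJoin (ls : List (List Char)) : List Char := (ls.map (fun r => '#' :: r)).flatten

-- A's active-sites accumulator as a function of the run list
def pvAsOf (rs : List (List Char)) : List Char := pvHashJoin (rs.filter pvHd)

-- A's non-active accumulator: the leading '#' is missing iff the first run is non-active (b0 = false)
def pvNaOf (b0 : Bool) (rs : List (List Char)) : List Char :=
  if b0 then pvHashJoin (rs.filter (fun r => !pvHd r))
  else (pvHashJoin (rs.filter (fun r => !pvHd r))).tail

-- run lists produced by the loops: nonempty, '#'-free, classes alternating starting with b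
def pvAltRuns : Bool → List (List Char) → Prop
  | _, [] => True
  | b, r :: rs => r ≠ [] ∧ '#' ∉ r ∧ pvHd r = b ∧ pvAltRuns (!b) rs

theorem pv_tail_append {α : Type} (x y : List α) (h : x ≠ []) : (x ++ y).tail = x.tail ++ y := by
  cases x with
  | nil => exact absurd rfl h
  | cons a t => simp

theorem pvHashJoin_append (xs ys : List (List Char)) :
    pvHashJoin (xs ++ ys) = pvHashJoin xs ++ pvHashJoin ys := by
  simp [pvHashJoin]

theorem pvHd_append (cur : List Char) (c : Char) (h : cur ≠ []) : pvHd (cur ++ [c]) = pvHd cur := by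
  cases cur with
  | nil => exact absurd rfl h
  | cons d t => simp [pvHd]

theorem pvAltRuns_snoc (b : Bool) (x : List Char) (hx : x ≠ []) (hhash : '#' ∉ x) :
    ∀ (rs : List (List Char)) (y : List Char), pvAltRuns b (rs ++ [y]) → pvHd x = !pvHd y →
    pvAltRuns b (rs ++ [y] ++ [x]) := by
  intro rs
  induction rs generalizing b with
  | nil =>
    intro y h hc
    obtain ⟨h1, h2, h3, _⟩ := h
    exact ⟨h1, h2, h3, hx, hhash, by rw [hc, h3], trivial⟩
  | cons r rs ih =>
    intro y h hc
    obtain ⟨h1, h2, h3, h4⟩ := h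
    exact ⟨h1, h2, h3, ih (!b) y h4 hc⟩

theorem pv_lows_ne_nil (b0 : Bool) (rs : List (List Char)) (h : pvAltRuns b0 rs) (hne : rs ≠ [])
    (hb : b0 = false) : rs.filter (fun r => !pvHd r) ≠ [] := by
  subst hb
  cases rs with
  | nil => exact absurd rfl hne
  | cons r t =>
    obtain ⟨-, -, h3, -⟩ := h
    simp [List.filter, h3]

theorem pvHashJoin_ne_nil (ls : List (List Char)) (h : ls ≠ []) : pvHashJoin ls ≠ [] := by
  cases ls with
  | nil => exact absurd rfl h
  | cons l t => simp [pvHashJoin]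

theorem pvAltRuns_last_extend : ∀ (rs : List (List Char)) (b : Bool) (cur : List Char) (c : Char),
    pvAltRuns b (rs ++ [cur]) → cur ≠ [] → c ≠ '#' → pvAltRuns b (rs ++ [cur ++ [c]]) := by
  intro rs
  induction rs with
  | nil =>
    intro b cur c h hne hc
    obtain ⟨h1, h2, h3, -⟩ := h
    refine ⟨by simp, ?_, ?_, trivial⟩
    · intro hm
      rcases List.mem_append.mp hm with hm | hm
      · exact h2 hm
      · simp at hm; exact hc hm.symm
    · rw [pvHd_append _ _ hne]; exact h3
  | cons r t ih =>
    intro b cur c h hne hc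
    obtain ⟨h1, h2, h3, h4⟩ := h
    exact ⟨h1, h2, h3, ih (!b) cur c h4 hne hc⟩

theorem pvAltRuns_all : ∀ (rs : List (List Char)) (b : Bool), pvAltRuns b rs →
    ∀ r ∈ rs, r ≠ [] ∧ '#' ∉ r := by
  intro rs
  induction rs with
  | nil => intro b _ r hr; simp at hr
  | cons x t ih =>
    intro b h r hr
    obtain ⟨h1, h2, h3, h4⟩ := h
    rcases List.mem_cons.mp hr with rfl | hr
    · exact ⟨h1, h2⟩
    · exact ih (!b) h4 r hr

theorem pvAsOf_extend (runs : List (List Char)) (cur : List Char) (c : Char) (hne : cur ≠ []) :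
    pvAsOf (runs ++ [cur ++ [c]])
      = if pvHd cur then pvAsOf (runs ++ [cur]) ++ [c] else pvAsOf (runs ++ [cur]) := by
  unfold pvAsOf
  rw [List.filter_append, List.filter_append, pvHashJoin_append, pvHashJoin_append]
  by_cases h : pvHd cur = true
  · simp [List.filter, pvHd_append _ _ hne, h, pvHashJoin]
  · simp at h
    simp [List.filter, pvHd_append _ _ hne, h, pvHashJoin]

theorem pvNaOf_extend (b0 : Bool) (runs : List (List Char)) (cur : List Char) (c : Char)
    (hne : cur ≠ []) :
    pvNaOf b0 (runs ++ [cur ++ [c]])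
      = if pvHd cur then pvNaOf b0 (runs ++ [cur]) else pvNaOf b0 (runs ++ [cur]) ++ [c] := by
  unfold pvNaOf
  rw [List.filter_append, List.filter_append, pvHashJoin_append, pvHashJoin_append]
  by_cases h : pvHd cur = true
  · simp [List.filter, pvHd_append _ _ hne, h, pvHashJoin]
  · simp at h
    have hX : ∀ (X : List Char),
        X ++ pvHashJoin [cur ++ [c]] = (X ++ pvHashJoin [cur]) ++ [c] := by
      intro X; simp [pvHashJoin]
    have hfil : ∀ (z : List Char), (List.filter (fun r => !pvHd r) [z] : List (List Char))
        = if pvHd z then [] else [z] := by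
      intro z; by_cases hz : pvHd z = true <;> simp [List.filter, hz]
    rw [hfil, hfil, pvHd_append _ _ hne, h]
    simp only [if_false, Bool.false_eq_true]
    cases b0 with
    | true => simp [hX]
    | false =>
      simp only [Bool.false_eq_true, if_false]
      have h1 : pvHashJoin (List.filter (fun r => !pvHd r) runs) ++ pvHashJoin [cur ++ [c]]
          = (pvHashJoin (List.filter (fun r => !pvHd r) runs) ++ pvHashJoin [cur]) ++ [c] := hX _
      rw [h1, pv_tail_append]
      intro hemp
      have : pvHashJoin [cur] ≠ [] := pvHashJoin_ne_nil [cur] (by simp)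
      exact this (List.append_eq_nil_iff.mp hemp).2

theorem pvAsOf_newrun (runs : List (List Char)) (cur : List Char) (c : Char) :
    pvAsOf ((runs ++ [cur]) ++ [[c]])
      = if pvHigh c then (pvAsOf (runs ++ [cur]) ++ ['#']) ++ [c] else pvAsOf (runs ++ [cur]) := by
  unfold pvAsOf
  rw [List.filter_append (l₂ := [[c]]), pvHashJoin_append]
  by_cases h : pvHigh c = true <;>
    simp [List.filter, pvHd, h, pvHashJoin]

theorem pvNaOf_newrun (b0 : Bool) (runs : List (List Char)) (cur : List Char) (c : Char)
    (_hcur : cur ≠ []) (halt : pvAltRuns b0 (runs ++ [cur])) :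
    pvNaOf b0 ((runs ++ [cur]) ++ [[c]])
      = if pvHigh c then pvNaOf b0 (runs ++ [cur])
        else (pvNaOf b0 (runs ++ [cur]) ++ ['#']) ++ [c] := by
  unfold pvNaOf
  rw [List.filter_append (l₂ := [[c]]), pvHashJoin_append]
  by_cases h : pvHigh c = true
  · simp [List.filter, pvHd, h, pvHashJoin]
  · simp at h
    have hfil : (List.filter (fun r => !pvHd r) [[c]] : List (List Char)) = [[c]] := by
      simp [List.filter, pvHd, h]
    rw [hfil]
    cases b0 with
    | true => simp [pvHashJoin, h]
    | false =>
      have hlows : List.filter (fun r => !pvHd r) (runs ++ [cur]) ≠ [] :=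
        pv_lows_ne_nil false (runs ++ [cur]) halt (by simp) rfl
      have hne2 : pvHashJoin (List.filter (fun r => !pvHd r) (runs ++ [cur])) ≠ [] :=
        pvHashJoin_ne_nil _ hlows
      rw [pv_tail_append _ _ hne2]
      simp [pvHashJoin, h]

-- the loop invariant: A's accumulators are determined by B's run list
theorem pv_loop_inv (cs : List Char) :
    ∀ (runs : List (List Char)) (cur : List Char) (b0 : Bool),
    '#' ∉ cs → cur ≠ [] → pvAltRuns b0 (runs ++ [cur]) →
    pvALoop cs (pvNaOf b0 (runs ++ [cur])) (pvAsOf (runs ++ [cur])) (pvHd cur)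
      = (pvNaOf b0 ((pvBLoop cs runs cur).1 ++ [(pvBLoop cs runs cur).2]),
         pvAsOf ((pvBLoop cs runs cur).1 ++ [(pvBLoop cs runs cur).2]))
    ∧ (pvBLoop cs runs cur).2 ≠ []
    ∧ pvAltRuns b0 ((pvBLoop cs runs cur).1 ++ [(pvBLoop cs runs cur).2]) := by
  induction cs with
  | nil =>
    intro runs cur b0 _ hcur halt
    exact ⟨rfl, hcur, halt⟩
  | cons c cs ih =>
    intro runs cur b0 hcs hcur halt
    have hc : c ≠ '#' := fun h => hcs (by simp [h])
    have hcs' : '#' ∉ cs := fun h => hcs (by simp [h])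
    by_cases hsame : pvHigh c = pvHd cur
    · have hB : pvBLoop (c :: cs) runs cur = pvBLoop cs runs (cur ++ [c]) := by
        cases cur with
        | nil => exact absurd rfl hcur
        | cons d t =>
          simp only [pvHd] at hsame
          simp [pvBLoop, hsame]
      have hcur2 : cur ++ [c] ≠ [] := by simp
      have halt2 : pvAltRuns b0 (runs ++ [cur ++ [c]]) :=
        pvAltRuns_last_extend runs b0 cur c halt hcur hc
      have hihx := ih runs (cur ++ [c]) b0 hcs' hcur2 halt2
      rw [hB]
      cases h0 : pvHd cur with
      | true =>
        have hch : pvHigh c = true := by rw [hsame, h0]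
        have e1 : pvAsOf (runs ++ [cur ++ [c]]) = pvAsOf (runs ++ [cur]) ++ [c] := by
          rw [pvAsOf_extend _ _ _ hcur, h0]; simp
        have e2 : pvNaOf b0 (runs ++ [cur ++ [c]]) = pvNaOf b0 (runs ++ [cur]) := by
          rw [pvNaOf_extend _ _ _ _ hcur, h0]; simp
        have e3 : pvHd (cur ++ [c]) = true := by rw [pvHd_append _ _ hcur, h0]
        rw [e1, e2, e3] at hihx
        simpa [pvALoop, hch, h0] using hihx
      | false =>
        have hch : pvHigh c = false := by rw [hsame, h0]
        have e1 : pvAsOf (runs ++ [cur ++ [c]]) = pvAsOf (runs ++ [cur]) := by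
          rw [pvAsOf_extend _ _ _ hcur, h0]; simp
        have e2 : pvNaOf b0 (runs ++ [cur ++ [c]]) = pvNaOf b0 (runs ++ [cur]) ++ [c] := by
          rw [pvNaOf_extend _ _ _ _ hcur, h0]; simp
        have e3 : pvHd (cur ++ [c]) = false := by rw [pvHd_append _ _ hcur, h0]
        rw [e1, e2, e3] at hihx
        simpa [pvALoop, hch, h0] using hihx
    · have hflip : pvHigh c = !pvHd cur := by
        cases hx : pvHd cur <;> cases hy : pvHigh c <;> simp_all
      have hB : pvBLoop (c :: cs) runs cur = pvBLoop cs (runs ++ [cur]) [c] := by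
        cases cur with
        | nil => exact absurd rfl hcur
        | cons d t =>
          simp only [pvHd] at hflip
          have hcond : (pvHigh c == pvHigh d) = false := by
            cases hx : pvHigh d <;> simp_all
          simp [pvBLoop, hcond]
      have halt2 : pvAltRuns b0 ((runs ++ [cur]) ++ [[c]]) :=
        pvAltRuns_snoc b0 [c] (by simp)
          (by intro hm; simp at hm; exact hc hm.symm) runs cur halt
          (by simp [pvHd, hflip])
      have hihx := ih (runs ++ [cur]) [c] b0 hcs' (by simp) halt2
      rw [hB]
      cases h0 : pvHd cur with
      | false =>
        have hch : pvHigh c = true := by rw [hflip, h0]; rfl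
        have e1 : pvAsOf ((runs ++ [cur]) ++ [[c]]) = (pvAsOf (runs ++ [cur]) ++ ['#']) ++ [c] := by
          rw [pvAsOf_newrun, hch]; simp
        have e2 : pvNaOf b0 ((runs ++ [cur]) ++ [[c]]) = pvNaOf b0 (runs ++ [cur]) := by
          rw [pvNaOf_newrun _ _ _ _ hcur halt, hch]; simp
        have e3 : pvHd [c] = true := by simp [pvHd, hch]
        rw [e1, e2, e3] at hihx
        simpa [pvALoop, hch, h0] using hihx
      | true =>
        have hch : pvHigh c = false := by rw [hflip, h0]; rfl
        have e1 : pvAsOf ((runs ++ [cur]) ++ [[c]]) = pvAsOf (runs ++ [cur]) := by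
          rw [pvAsOf_newrun, hch]; simp
        have e2 : pvNaOf b0 ((runs ++ [cur]) ++ [[c]])
            = (pvNaOf b0 (runs ++ [cur]) ++ ['#']) ++ [c] := by
          rw [pvNaOf_newrun _ _ _ _ hcur halt, hch]; simp
        have e3 : pvHd [c] = false := by simp [pvHd, hch]
        rw [e1, e2, e3] at hihx
        simpa [pvALoop, hch, h0] using hihx

theorem pvSplitHash_prepend (l : List Char) (y : List Char) (r : List Char) (rs : List (List Char))
    (hl : '#' ∉ l) (h : pvSplitHash y = r :: rs) : pvSplitHash (l ++ y) = (l ++ r) :: rs := by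
  induction l with
  | nil => simpa using h
  | cons c t ih =>
    have hc : c ≠ '#' := by intro hc; exact hl (by simp [hc])
    have ht : '#' ∉ t := by intro hm; exact hl (by simp [hm])
    simp [pvSplitHash, hc, ih ht]

theorem pvSplitHash_hashJoin (ls : List (List Char)) (h : ∀ r ∈ ls, r ≠ [] ∧ '#' ∉ r) :
    ∃ rs, pvSplitHash (pvHashJoin ls) = [] :: rs ∧ rs.filter (fun r => r ≠ []) = ls := by
  induction ls with
  | nil => exact ⟨[], rfl, rfl⟩
  | cons l rest ih =>
    obtain ⟨rs', hsplit, hfilt⟩ := ih (fun r hr => h r (by simp [hr]))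
    obtain ⟨hlne, hlh⟩ := h l (by simp)
    have hpre : pvSplitHash (l ++ pvHashJoin rest) = l :: rs' := by
      have := pvSplitHash_prepend l (pvHashJoin rest) [] rs' hlh hsplit
      simpa using this
    refine ⟨l :: rs', ?_, ?_⟩
    · have : pvHashJoin (l :: rest) = '#' :: (l ++ pvHashJoin rest) := by simp [pvHashJoin]
      rw [this]; simp [pvSplitHash, hpre]
    · simpa [List.filter, hlne] using hfilt

-- split-then-filter inverts hashJoin, with or without the leading '#'
theorem pv_splitFilter_hashJoin (ls : List (List Char)) (h : ∀ r ∈ ls, r ≠ [] ∧ '#' ∉ r) :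
    (pvSplitHash (pvHashJoin ls)).filter (fun r => r ≠ []) = ls := by
  obtain ⟨rs, hsplit, hfilt⟩ := pvSplitHash_hashJoin ls h
  rw [hsplit]; simpa using hfilt

theorem pv_splitFilter_hashJoin_tail (ls : List (List Char)) (h : ∀ r ∈ ls, r ≠ [] ∧ '#' ∉ r) :
    (pvSplitHash (pvHashJoin ls).tail).filter (fun r => r ≠ []) = ls := by
  cases ls with
  | nil => simp [pvHashJoin, pvSplitHash]
  | cons l rest =>
    obtain ⟨rs, hsplit, hfilt⟩ := pvSplitHash_hashJoin (l :: rest) h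
    have hjoin : pvHashJoin (l :: rest) = '#' :: (l ++ pvHashJoin rest) := by simp [pvHashJoin]
    have : pvSplitHash ('#' :: (l ++ pvHashJoin rest)) = [] :: pvSplitHash (l ++ pvHashJoin rest) := by
      simp [pvSplitHash]
    rw [hjoin] at hsplit
    rw [this] at hsplit
    have hsp : pvSplitHash (l ++ pvHashJoin rest) = rs := by
      injection hsplit with _ h2
    rw [hjoin]
    simpa [hsp] using hfilt

-- the zip-interleave-leftover of A, as one function of the two filtered lists
def pvZipFlat (x y : List (List Char)) : List (List Char) := (x.zip y).flatMap (fun t => [t.1, t.2])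

def pvLeftover (U L : List (List Char)) : List (List Char) :=
  if U.length > L.length then [U.getLast?.getD []]
  else if U.length < L.length then [L.getLast?.getD []]
  else []

def pvInterExpr (b : Bool) (R : List (List Char)) : List (List Char) :=
  (if b then pvZipFlat (R.filter pvHd) (R.filter (fun r => !pvHd r))
   else pvZipFlat (R.filter (fun r => !pvHd r)) (R.filter pvHd))
  ++ pvLeftover (R.filter pvHd) (R.filter (fun r => !pvHd r))

theorem pvZipFlat_cons (x y : List Char) (xs ys : List (List Char)) :
    pvZipFlat (x :: xs) (y :: ys) = x :: y :: pvZipFlat xs ys := by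
  simp [pvZipFlat]

theorem pv_leftover_step (r1 r2 : List Char) (U L : List (List Char)) :
    pvLeftover (r1 :: U) (r2 :: L) = pvLeftover U L := by
  unfold pvLeftover
  simp only [List.length_cons, gt_iff_lt, Nat.add_lt_add_iff_right]
  split_ifs with h1 h2
  · have hU : U ≠ [] := by intro hU; rw [hU] at h1; simp at h1
    obtain ⟨u0, U', rfl⟩ := List.exists_cons_of_ne_nil hU
    rw [List.getLast?_cons_cons]
  · have hL : L ≠ [] := by intro hL; rw [hL] at h2; simp at h2
    obtain ⟨l0, L', rfl⟩ := List.exists_cons_of_ne_nil hL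
    rw [List.getLast?_cons_cons]
  · rfl

theorem pv_interleave_aux : ∀ (n : Nat) (R : List (List Char)) (b : Bool),
    R.length ≤ n → pvAltRuns b R → pvInterExpr b R = R := by
  intro n
  induction n with
  | zero =>
    intro R b hlen _
    have : R = [] := List.eq_nil_of_length_eq_zero (Nat.le_zero.mp hlen)
    subst this
    cases b <;> simp [pvInterExpr, pvZipFlat, pvLeftover]
  | succ n ih =>
    intro R b hlen halt
    match R with
    | [] => cases b <;> simp [pvInterExpr, pvZipFlat, pvLeftover]
    | [r] =>
      obtain ⟨h1, h2, h3, -⟩ := halt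
      cases b <;>
        simp [pvInterExpr, pvZipFlat, pvLeftover, List.filter, h3]
    | r1 :: r2 :: R'' =>
      obtain ⟨h1, hh1, h3, h4⟩ := halt
      obtain ⟨h1', hh2, h3', h4'⟩ := h4
      have halt'' : pvAltRuns b R'' := by simpa using h4'
      have hlen'' : R''.length ≤ n := by simp at hlen; omega
      have hIH := ih R'' b hlen'' halt''
      cases b with
      | true =>
        have hf1 : (r1 :: r2 :: R'').filter pvHd = r1 :: R''.filter pvHd := by
          simp [List.filter, h3, h3']
        have hf2 : (r1 :: r2 :: R'').filter (fun r => !pvHd r) = r2 :: R''.filter (fun r => !pvHd r) := by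
          simp [List.filter, h3, h3']
        unfold pvInterExpr at hIH ⊢
        rw [hf1, hf2, if_pos rfl] at *
        rw [pvZipFlat_cons, pv_leftover_step]
        simp only [List.cons_append]
        rw [hIH]
      | false =>
        have hf1 : (r1 :: r2 :: R'').filter pvHd = r2 :: R''.filter pvHd := by
          simp [List.filter, h3, h3']
        have hf2 : (r1 :: r2 :: R'').filter (fun r => !pvHd r) = r1 :: R''.filter (fun r => !pvHd r) := by
          simp [List.filter, h3, h3']
        unfold pvInterExpr at hIH ⊢
        rw [hf1, hf2, if_neg (by simp)] at *
        rw [pvZipFlat_cons, pv_leftover_step]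
        simp only [List.cons_append]
        rw [hIH]

-- the zip-interleave-leftover of the two filtered lists reassembles the alternating run list
theorem pv_interleave (R : List (List Char)) (b : Bool) (h : pvAltRuns b R) :
    pvInterExpr b R = R :=
  pv_interleave_aux R.length R b le_rfl h

theorem pv_na_split (b0 : Bool) (R : List (List Char)) (hall : ∀ r ∈ R, r ≠ [] ∧ '#' ∉ r) :
    (pvSplitHash (pvNaOf b0 R)).filter (fun r => r ≠ []) = R.filter (fun r => !pvHd r) := by
  have hall' : ∀ r ∈ R.filter (fun r => !pvHd r), r ≠ [] ∧ '#' ∉ r :=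
    fun r hr => hall r (List.mem_of_mem_filter hr)
  cases b0 with
  | true => unfold pvNaOf; simpa using pv_splitFilter_hashJoin _ hall'
  | false => unfold pvNaOf; simpa using pv_splitFilter_hashJoin_tail _ hall'

theorem pv_as_split (R : List (List Char)) (hall : ∀ r ∈ R, r ≠ [] ∧ '#' ∉ r) :
    (pvSplitHash (pvAsOf R)).filter (fun r => r ≠ []) = R.filter pvHd := by
  have hall' : ∀ r ∈ R.filter pvHd, r ≠ [] ∧ '#' ∉ r :=
    fun r hr => hall r (List.mem_of_mem_filter hr)
  unfold pvAsOf
  exact pv_splitFilter_hashJoin _ hall'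

theorem pvLowHd_eq (r : List Char) (h : r ≠ []) : pvLowHd r = !pvHd r := by
  cases r with
  | nil => exact absurd rfl h
  | cons d t =>
    show decide ('Z' < d) = !decide (d ≤ 'Z')
    rw [← decide_not]
    exact decide_eq_decide.mpr not_le.symm

theorem pv_if_append {γ : Type} (c1 c2 : Prop) [Decidable c1] [Decidable c2]
    (a x y : List γ) :
    (if c1 then a ++ x else if c2 then a ++ y else a)
      = a ++ (if c1 then x else if c2 then y else []) := by
  split_ifs <;> simp

-- ===== VERDICT (by name: the statement is the Claim_ definition above) =====
theorem extract_active_sites_info_spec : Claim_equal_extract_active_sites_info := by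
  unfold Claim_equal_extract_active_sites_info
  intro s _ hpre
  obtain ⟨hne, hnh⟩ := hpre
  unfold Spec_extract_active_sites_info
  obtain ⟨c0, cs, hs⟩ : ∃ c0 cs, s.toList = c0 :: cs := by
    cases h : s.toList with
    | nil => exact absurd h hne
    | cons a t => exact ⟨a, t, rfl⟩
  have hc0 : c0 ≠ '#' := by rw [hs] at hnh; exact fun h => hnh (by simp [h])
  have hcs : '#' ∉ cs := by rw [hs] at hnh; exact fun h => hnh (by simp [h])
  have halt0 : pvAltRuns (pvHigh c0) ([] ++ [[c0]]) :=
    ⟨by simp, by intro hm; simp at hm; exact hc0 hm.symm, rfl, trivial⟩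
  obtain ⟨hstates, hcur, haltR⟩ := pv_loop_inv cs [] [c0] (pvHigh c0) hcs (by simp) halt0
  have hall := pvAltRuns_all _ _ haltR
  -- A's loop from its initial state
  have hstep : pvALoop (c0 :: cs) [] [] false
      = pvALoop cs (pvNaOf (pvHigh c0) [[c0]]) (pvAsOf [[c0]]) (pvHd [c0]) := by
    cases hb : pvHigh c0 <;>
      simp [pvALoop, hb, pvNaOf, pvAsOf, pvHashJoin, List.filter, pvHd]
  have hAloop : pvALoop s.toList [] [] false
      = (pvNaOf (pvHigh c0) ((pvBLoop cs [] [c0]).1 ++ [(pvBLoop cs [] [c0]).2]),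
         pvAsOf ((pvBLoop cs [] [c0]).1 ++ [(pvBLoop cs [] [c0]).2])) := by
    rw [hs, hstep]
    simpa using hstates
  have hBv : pvBLoop s.toList [] [] = pvBLoop cs [] [c0] := by
    rw [hs]; simp [pvBLoop]
  have h3 : PySem.Str.pyGet? s 0 = some c0 := by
    rw [show ((0 : Int)) = ((0 : Nat) : Int) from rfl, PySem.Str.pyGet?_natCast, hs]; rfl
  have h4 := pv_na_split (pvHigh c0) _ hall
  have h5 := pv_as_split _ hall
  have h6 : ((pvBLoop cs [] [c0]).1 ++ [(pvBLoop cs [] [c0]).2]).filter pvLowHd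
      = ((pvBLoop cs [] [c0]).1 ++ [(pvBLoop cs [] [c0]).2]).filter (fun r => !pvHd r) :=
    List.filter_congr (fun r hr => by rw [pvLowHd_eq r (hall r hr).1])
  have hinter := pv_interleave _ _ haltR
  unfold extract_active_sites_info extract_active_sites_info_alt
  rw [hAloop, hBv, h3]
  simp only [h4, h5, h6, hcur, if_pos, ne_eq, not_false_iff]
  unfold pvInterExpr pvZipFlat pvLeftover at hinter
  rw [← apply_ite (fun (l : List (List Char × List Char)) => l.flatMap (fun t => [t.1, t.2]))] at hinter
  simp only [PySem.List.pyGet?_neg_one, pv_if_append]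
  rw [hinter]
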